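-- pv_equiv track=rewrite | github.com/shamus-li/gtop | gtop/constraints.py | _tokenize_constraint
-- ===== SOURCE A (Python) =====
-- from typing import Any, List, Optional, Set
--
-- def _tokenize_constraint(expr: str) -> List[str]:
--     tokens: List[str] = []
--     index = 0
--
--     while index < len(expr):
--         char = expr[index]
--         if char.isspace():
--             index += 1
--             continue
--         if char in "()&|":
--             tokens.append(char)
--             index += 1
--             continue
--         if char == "[":
--             tokens.append("(")
--             index += 1
--             continue
--         if char == "]":
--             tokens.append(")")
--             index += 1
--             continue
--
--         start = index
--         while index < len(expr) and expr[index] not in "()&|[] " and not expr[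
--             index
--         ].isspace():
--             index += 1
--         tokens.append(expr[start:index])
--
--     return tokens
-- ===== SOURCE B (Python) =====
-- from typing import List
--
-- def _tokenize_constraint(expr: str) -> List[str]:
--     padded = "".join(" %s " % c if c in "()&|[]" else c for c in expr)
--     return [{"[": "(", "]": ")"}.get(t, t) for t in padded.split()]
-- ===== Notes on version B (the rewrite author's own statement) =====
-- stated objective: idiomatic
-- what changed: Replaces the index-based two-level while scanner with a pad-delimiters-with-spaces + str.split() pipeline and a comprehension mapping brackets to parens.
import Mathlib
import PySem

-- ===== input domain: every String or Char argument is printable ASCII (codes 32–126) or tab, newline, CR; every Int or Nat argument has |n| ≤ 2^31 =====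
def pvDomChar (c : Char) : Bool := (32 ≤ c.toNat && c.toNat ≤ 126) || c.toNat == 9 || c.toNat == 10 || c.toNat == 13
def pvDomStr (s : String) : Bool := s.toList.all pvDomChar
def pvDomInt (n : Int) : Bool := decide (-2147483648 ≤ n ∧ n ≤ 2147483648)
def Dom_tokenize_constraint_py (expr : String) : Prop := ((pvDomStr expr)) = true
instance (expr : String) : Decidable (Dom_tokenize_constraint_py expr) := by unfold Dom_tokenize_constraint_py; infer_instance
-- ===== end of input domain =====

-- B replaces A's index-based two-level while scanner by padding delimiters with spaces,
-- splitting on whitespace and mapping brackets to parens (more idiomatic, same cost).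


-- ===== PORT A =====
-- break set of A's inner while: "()&|[] " plus isspace
def pvBreakA (c : Char) : Bool :=
  (['(', ')', '&', '|', '[', ']', ' '].contains c) || PySem.Chars.isspace c

-- literal port of A's scanner: outer while over the index = recursion on the remaining chars,
-- inner word-while = takeWhile/dropWhile of the same predicate
def pvTokA (l : List Char) : List String :=
  match l with
  | [] => []
  | c :: rest =>
    if _h1 : PySem.Chars.isspace c then pvTokA rest
    else if _h2 : ['(', ')', '&', '|'].contains c then String.ofList [c] :: pvTokA rest
    else if _h3 : c = '[' then "(" :: pvTokA rest
    else if _h4 : c = ']' then ")" :: pvTokA rest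
    else
      String.ofList ((c :: rest).takeWhile (fun d => !pvBreakA d)) ::
        pvTokA ((c :: rest).dropWhile (fun d => !pvBreakA d))
termination_by l.length
decreasing_by
  all_goals simp
  have h5 : c ≠ ' ' := fun e => _h1 (by subst e; decide)
  have hsp : PySem.Chars.isspace c = false := by simpa using _h1
  simp only [List.contains_eq_mem, decide_eq_true_eq] at _h2
  simp at _h2
  have hc : pvBreakA c = false := by
    simp [pvBreakA, _h2, _h3, _h4, h5, hsp]
  simp only [List.dropWhile_cons, hc, Bool.not_false, if_pos]
  exact List.length_dropWhile_le (fun d => !pvBreakA d) rest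

def tokenize_constraint_py (expr : String) : List String := pvTokA expr.toList

-- ===== PORT B =====
-- pad a delimiter with spaces, leave other chars alone (the join-comprehension of Source B)
def pvPad (c : Char) : List Char :=
  if ['(', ')', '&', '|', '[', ']'].contains c then [' ', c, ' '] else [c]

-- the dict lookup {"[": "(", "]": ")"}.get(t, t)
def pvFix (t : List Char) : String :=
  if t = ['['] then "(" else if t = [']'] then ")" else String.ofList t

def tokenize_constraint_py_alt (expr : String) : List String :=
  (PySem.Chars.split₀ (expr.toList.flatMap pvPad)).map pvFix

-- ===== PRECONDITION & SPEC =====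
def Spec_tokenize_constraint_py (expr : String) (out : List String) : Prop := out = tokenize_constraint_py_alt expr
instance (expr : String) (out : List String) : Decidable (Spec_tokenize_constraint_py expr out) := by unfold Spec_tokenize_constraint_py; infer_instance

-- ===== CLAIM (what is proved, stated in full; the proofs are below) =====
def Claim_equal_tokenize_constraint_py : Prop := ∀ (expr : String), Dom_tokenize_constraint_py expr → Spec_tokenize_constraint_py expr (tokenize_constraint_py expr)

-- ===== LEMMAS AND PROOFS =====

-- accumulator lemma for split₀.go
theorem pv_go_acc (t : List Char) (cur : List Char) (acc : List (List Char)) :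
    PySem.Chars.split₀.go t cur acc = acc.reverse ++ PySem.Chars.split₀.go t cur [] := by
  induction t generalizing cur acc with
  | nil => simp only [PySem.Chars.split₀.go]; split <;> simp
  | cons c rest ih =>
    simp only [PySem.Chars.split₀.go]
    split
    · split
      · exact ih [] acc
      · rw [ih [] (cur.reverse :: acc), ih [] [cur.reverse]]
        simp
    · exact ih (c :: cur) acc

-- a leading space is skipped
theorem pv_split_space (c : Char) (t : List Char) (h : PySem.Chars.isspace c = true) :
    PySem.Chars.split₀ (c :: t) = PySem.Chars.split₀ t := by
  simp [PySem.Chars.split₀, PySem.Chars.split₀.go, h]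

-- a space-padded single non-space char is one token
theorem pv_split_pad (c : Char) (t : List Char) (h : PySem.Chars.isspace c = false) :
    PySem.Chars.split₀ (' ' :: c :: ' ' :: t) = [c] :: PySem.Chars.split₀ t := by
  have hs : PySem.Chars.isspace ' ' = true := by decide
  simp only [PySem.Chars.split₀, PySem.Chars.split₀.go, hs, h, if_pos,
    List.isEmpty_nil, Bool.false_eq_true, if_false, List.isEmpty_cons]
  rw [pv_go_acc t [] [[c].reverse]]
  simp

-- a run of non-space chars is absorbed into the current token
theorem pv_go_word (w : List Char) (t cur : List Char) (acc : List (List Char))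
    (hall : ∀ c ∈ w, PySem.Chars.isspace c = false) :
    PySem.Chars.split₀.go (w ++ t) cur acc = PySem.Chars.split₀.go t (w.reverse ++ cur) acc := by
  induction w generalizing cur with
  | nil => simp
  | cons c w' ih =>
    have hc : PySem.Chars.isspace c = false := hall c (by simp)
    simp only [List.cons_append, PySem.Chars.split₀.go, hc, Bool.false_eq_true, if_false]
    rw [ih (c :: cur) (fun d hd => hall d (by simp [hd]))]
    simp

-- a nonempty all-non-space run followed by end-of-string or a space is one token
theorem pv_split_word (w t : List Char) (hw : w ≠ [])
    (hall : ∀ c ∈ w, PySem.Chars.isspace c = false)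
    (ht : t = [] ∨ ∃ s t', t = s :: t' ∧ PySem.Chars.isspace s = true) :
    PySem.Chars.split₀ (w ++ t) = w :: PySem.Chars.split₀ t := by
  have hne : w.reverse.isEmpty = false := by simp [hw]
  rcases ht with rfl | ⟨s, t', rfl, hs⟩
  · have hgo := pv_go_word w [] [] [] hall
    simp only [List.append_nil] at hgo
    simp only [PySem.Chars.split₀, hgo, PySem.Chars.split₀.go, List.append_nil, hne]
    simp
  · rw [pv_split_space s t' hs]
    have hgo := pv_go_word w (s :: t') [] [] hall
    simp only [List.append_nil] at hgo
    simp only [PySem.Chars.split₀, hgo, PySem.Chars.split₀.go, hne, hs]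
    rw [pv_go_acc t' [] [w.reverse.reverse]]
    simp

-- a delimiter is never whitespace
theorem pv_delims_nonspace (c : Char) (h : (['(', ')', '&', '|', '[', ']'].contains c) = true) :
    PySem.Chars.isspace c = false := by
  simp only [List.contains_eq_mem, decide_eq_true_eq, List.mem_cons, List.not_mem_nil,
    or_false] at h
  rcases h with rfl | rfl | rfl | rfl | rfl | rfl <;> decide

-- a non-break char is neither a delimiter nor whitespace
theorem pv_break_parts (c : Char) (h : pvBreakA c = false) :
    (['(', ')', '&', '|', '[', ']'].contains c) = false ∧ PySem.Chars.isspace c = false := by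
  simp only [pvBreakA, Bool.or_eq_false_iff, List.contains_eq_mem, decide_eq_false_iff_not,
    List.mem_cons, List.not_mem_nil, or_false] at h ⊢
  exact ⟨fun hx => h.1 (by tauto), h.2⟩

theorem pv_pad_of_not_break (c : Char) (h : pvBreakA c = false) : pvPad c = [c] := by
  have h6 := (pv_break_parts c h).1
  unfold pvPad
  rw [h6]
  rfl

-- the word branch's guards imply the char is not a break char
theorem pv_nb (c : Char) (h1 : ¬PySem.Chars.isspace c = true)
    (h2 : ¬(['(', ')', '&', '|'].contains c) = true) (h3 : ¬c = '[') (h4 : ¬c = ']') :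
    pvBreakA c = false := by
  have h5 : c ≠ ' ' := fun e => h1 (by subst e; decide)
  simp only [List.contains_eq_mem, decide_eq_true_eq] at h2
  simp at h2
  simp [pvBreakA, h2, h3, h4, h5, (by simpa using h1 : PySem.Chars.isspace c = false)]

-- padding leaves a word-char list unchanged
theorem pv_flatMap_id (l : List Char) (h : ∀ d ∈ l, pvPad d = [d]) :
    List.flatMap pvPad l = l := by
  induction l with
  | nil => rfl
  | cons a t ih => simp [List.flatMap_cons, h a (by simp), ih fun d hd => h d (by simp [hd])]

-- padding a delimiter
theorem pv_pad_delim (c : Char) (h : (['(', ')', '&', '|', '[', ']'].contains c) = true)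
    (r : List Char) :
    List.flatMap pvPad (c :: r) = ' ' :: c :: ' ' :: List.flatMap pvPad r := by
  simp only [List.flatMap_cons]
  unfold pvPad
  rw [h]
  simp

-- the char-level equivalence
theorem pv_main (l : List Char) :
    pvTokA l = (PySem.Chars.split₀ (l.flatMap pvPad)).map pvFix := by
  induction l using pvTokA.induct with
  | case1 => simp [pvTokA, PySem.Chars.split₀, PySem.Chars.split₀.go]
  | case2 c rest h1 ih =>
    have h6 : (['(', ')', '&', '|', '[', ']'].contains c) = false := by
      cases hcs : (['(', ')', '&', '|', '[', ']'].contains c) with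
      | false => rfl
      | true => exact absurd (pv_delims_nonspace c hcs) (by simp [h1])
    have hfm : List.flatMap pvPad (c :: rest) = c :: List.flatMap pvPad rest := by
      simp only [List.flatMap_cons]
      unfold pvPad
      rw [h6]
      simp
    rw [pvTokA, hfm, pv_split_space c _ h1]
    simp only [h1]
    simpa using ih
  | case3 c rest h1 h2 ih =>
    simp only [List.contains_eq_mem, decide_eq_true_eq, List.mem_cons, List.not_mem_nil,
      or_false] at h2
    rcases h2 with rfl | rfl | rfl | rfl
    · rw [pvTokA, pv_pad_delim '(' (by decide) rest, pv_split_pad '(' _ (by decide)]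
      simp [pvFix, ih]
      decide
    · rw [pvTokA, pv_pad_delim ')' (by decide) rest, pv_split_pad ')' _ (by decide)]
      simp [pvFix, ih]
      decide
    · rw [pvTokA, pv_pad_delim '&' (by decide) rest, pv_split_pad '&' _ (by decide)]
      simp [pvFix, ih]
      decide
    · rw [pvTokA, pv_pad_delim '|' (by decide) rest, pv_split_pad '|' _ (by decide)]
      simp [pvFix, ih]
      decide
  | case4 rest _ _ ih =>
    rw [pvTokA]
    rw [pv_pad_delim '[' (by decide) rest, pv_split_pad '[' _ (by decide)]
    simp [pvFix, ih]
    decide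
  | case5 rest _ _ _ ih =>
    rw [pvTokA]
    rw [pv_pad_delim ']' (by decide) rest, pv_split_pad ']' _ (by decide)]
    simp [pvFix, ih]
    decide
  | case6 c rest h1 h2 h3 h4 ih =>
    have hc : pvBreakA c = false := pv_nb c h1 h2 h3 h4
    have hw : List.takeWhile (fun d => !pvBreakA d) (c :: rest)
        = c :: List.takeWhile (fun d => !pvBreakA d) rest := by
      simp [hc]
    have hwne : List.takeWhile (fun d => !pvBreakA d) (c :: rest) ≠ [] := by rw [hw]; simp
    have hall : ∀ d ∈ List.takeWhile (fun d => !pvBreakA d) (c :: rest),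
        PySem.Chars.isspace d = false := fun d hd =>
      (pv_break_parts d (by simpa using List.mem_takeWhile_imp hd)).2
    have hflatw : List.flatMap pvPad (List.takeWhile (fun d => !pvBreakA d) (c :: rest))
        = List.takeWhile (fun d => !pvBreakA d) (c :: rest) :=
      pv_flatMap_id _ fun d hd =>
        pv_pad_of_not_break d (by simpa using List.mem_takeWhile_imp hd)
    have hfm : List.flatMap pvPad (c :: rest)
        = List.takeWhile (fun d => !pvBreakA d) (c :: rest)
          ++ List.flatMap pvPad (List.dropWhile (fun d => !pvBreakA d) (c :: rest)) := by
      conv_lhs => rw [← List.takeWhile_append_dropWhile (p := fun d => !pvBreakA d)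
        (l := c :: rest)]
      rw [List.flatMap_append, hflatw]
    have ht : List.flatMap pvPad (List.dropWhile (fun d => !pvBreakA d) (c :: rest)) = []
        ∨ ∃ s t', List.flatMap pvPad (List.dropWhile (fun d => !pvBreakA d) (c :: rest))
            = s :: t' ∧ PySem.Chars.isspace s = true := by
      rcases hE : List.dropWhile (fun d => !pvBreakA d) (c :: rest) with _ | ⟨d0, r''⟩
      · left; rfl
      · right
        have hne : List.dropWhile (fun d => !pvBreakA d) (c :: rest) ≠ [] := by rw [hE]; simp
        have hd0 := List.head_dropWhile_not (fun d => !pvBreakA d) hne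
        have hd0' : pvBreakA d0 = true := by
          have hh : (List.dropWhile (fun d => !pvBreakA d) (c :: rest)).head hne = d0 := by
            simp [hE]
          rw [hh] at hd0
          simpa using hd0
        by_cases hsd : PySem.Chars.isspace d0 = true
        · have h6 : (['(', ')', '&', '|', '[', ']'].contains d0) = false := by
            cases h6 : (['(', ')', '&', '|', '[', ']'].contains d0) with
            | false => rfl
            | true => exact absurd (pv_delims_nonspace d0 h6) (by simp [hsd])
          refine ⟨d0, List.flatMap pvPad r'', ?_, hsd⟩
          simp only [List.flatMap_cons]
          unfold pvPad
          rw [h6]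
          simp
        · have h6 : (['(', ')', '&', '|', '[', ']'].contains d0) = true := by
            simp only [pvBreakA, Bool.or_eq_true] at hd0'
            rcases hd0' with h7 | h7
            · simp only [List.contains_eq_mem, decide_eq_true_eq, List.mem_cons,
                List.not_mem_nil, or_false] at h7 ⊢
              rcases h7 with rfl | rfl | rfl | rfl | rfl | rfl | rfl
              · tauto
              · tauto
              · tauto
              · tauto
              · tauto
              · tauto
              · exact absurd (by decide) hsd
            · exact absurd h7 hsd
          refine ⟨' ', d0 :: ' ' :: List.flatMap pvPad r'', ?_, by decide⟩
          simp only [List.flatMap_cons]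
          unfold pvPad
          rw [h6]
          simp
    rw [pvTokA]
    rw [dif_neg h1, dif_neg h2, dif_neg h3, dif_neg h4]
    rw [hfm, pv_split_word _ _ hwne hall ht, List.map_cons, ih]
    congr 1
    unfold pvFix
    rw [if_neg, if_neg]
    · intro he
      rw [hw] at he
      simp at he
      exact h4 he.1
    · intro he
      rw [hw] at he
      simp at he
      exact h3 he.1

-- ===== VERDICT (by name: the statement is the Claim_ definition above) =====
theorem tokenize_constraint_py_spec : Claim_equal_tokenize_constraint_py := by
  intro expr _
  unfold Spec_tokenize_constraint_py tokenize_constraint_py tokenize_constraint_py_alt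
  exact pv_main expr.toList
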